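-- pv_equiv track=rewrite | github.com/ozbekmert/Sprach-Erkennung- | recognizer/tools.py | next_pow2
-- ===== SOURCE A (Python) =====
-- def next_pow2(x):
--     next_pow = 1
--     counter = 0
--     if x == 0:
--         return 0
--     else:
--         while next_pow < abs(x):
--             next_pow = next_pow * 2
--             counter += 1
--     return counter
-- ===== SOURCE B (Python) =====
-- def next_pow2(x):
--     if x == 0:
--         return 0
--     return (abs(x) - 1).bit_length()
-- ===== Notes on version B (the rewrite author's own statement) =====
-- stated objective: simpler
-- what changed: Replaced the doubling while-loop that counts iterations with the closed form (abs(x)-1).bit_length().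
import Mathlib
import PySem

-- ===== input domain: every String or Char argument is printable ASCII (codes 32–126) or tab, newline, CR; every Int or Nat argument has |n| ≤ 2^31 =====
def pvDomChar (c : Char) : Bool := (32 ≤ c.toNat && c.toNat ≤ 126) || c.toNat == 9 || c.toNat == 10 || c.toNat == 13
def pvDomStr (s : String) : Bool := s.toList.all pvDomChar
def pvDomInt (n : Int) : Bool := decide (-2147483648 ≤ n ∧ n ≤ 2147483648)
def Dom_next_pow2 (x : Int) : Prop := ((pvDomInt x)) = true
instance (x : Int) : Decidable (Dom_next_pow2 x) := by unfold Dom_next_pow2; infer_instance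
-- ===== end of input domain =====

-- B replaces A's doubling while-loop with the closed form (abs(x)-1).bit_length(); objective: simpler.


-- ===== PORT A =====
-- the while-loop: state (next_pow, counter); `hp : 1 ≤ p` is only a totality guard
def next_pow2_loop (n p c : Int) (hp : 1 ≤ p) : Int :=
  if h : p < n then next_pow2_loop n (p * 2) (c + 1) (by omega) else c
termination_by (n - p).toNat
decreasing_by omega

def next_pow2 (x : Int) : Int :=
  if x = 0 then 0 else next_pow2_loop |x| 1 0 (by norm_num)

-- ===== PORT B =====
-- Python int.bit_length for a nonnegative integer
def pyBitLength (n : Nat) : Nat :=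
  if n = 0 then 0 else pyBitLength (n / 2) + 1

def next_pow2_alt (x : Int) : Int :=
  if x = 0 then 0 else ((pyBitLength (x.natAbs - 1) : Nat) : Int)

-- ===== PRECONDITION & SPEC =====
def Spec_next_pow2 (x : Int) (out : Int) : Prop := out = next_pow2_alt x
instance (x : Int) (out : Int) : Decidable (Spec_next_pow2 x out) := by unfold Spec_next_pow2; infer_instance

-- ===== CLAIM (what is proved, stated in full; the proofs are below) =====
def Claim_equal_next_pow2 : Prop := ∀ (x : Int), Dom_next_pow2 x → Spec_next_pow2 x (next_pow2 x)

-- ===== LEMMAS AND PROOFS =====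
lemma pyBitLength_zero : pyBitLength 0 = 0 := by rw [pyBitLength]; simp

lemma pyBitLength_pos (m : Nat) (hm : m ≠ 0) : pyBitLength m = pyBitLength (m / 2) + 1 := by
  rw [pyBitLength]; simp [hm]

lemma next_pow2_loop_eq (n : Int) (hn : 1 ≤ n) :
    ∀ (k : Nat) (p c : Int) (hp : 1 ≤ p), (n - p).toNat ≤ k →
      next_pow2_loop n p c hp = c + ((pyBitLength ((n.toNat - 1) / p.toNat)) : Int) := by
  intro k
  induction k with
  | zero =>
    intro p c hp hk
    rw [next_pow2_loop]
    have hpn : ¬ p < n := by omega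
    simp only [hpn, dite_false]
    have : (n.toNat - 1) / p.toNat = 0 := Nat.div_eq_of_lt (by omega)
    rw [this, pyBitLength_zero]; simp
  | succ k ih =>
    intro p c hp hk
    rw [next_pow2_loop]
    by_cases hpn : p < n
    · simp only [hpn, dite_true]
      rw [ih (p * 2) (c + 1) (by omega) (by omega)]
      have hP2 : (p * 2).toNat = p.toNat * 2 := by omega
      have hm : 1 ≤ (n.toNat - 1) / p.toNat :=
        (Nat.one_le_div_iff (by omega)).2 (by omega)
      rw [hP2, ← Nat.div_div_eq_div_mul,
        pyBitLength_pos ((n.toNat - 1) / p.toNat) (by omega)]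
      push_cast; ring
    · simp only [hpn, dite_false]
      have : (n.toNat - 1) / p.toNat = 0 := Nat.div_eq_of_lt (by omega)
      rw [this, pyBitLength_zero]; simp

-- ===== VERDICT (by name: the statement is the Claim_ definition above) =====
theorem next_pow2_spec : Claim_equal_next_pow2 := by
  intro x _
  unfold Spec_next_pow2 next_pow2 next_pow2_alt
  by_cases hx : x = 0
  · simp [hx]
  · simp only [hx, if_false]
    have habs : |x| = (x.natAbs : Int) := Int.abs_eq_natAbs x
    have hn : 1 ≤ |x| := by
      rw [habs]; have : x.natAbs ≠ 0 := Int.natAbs_ne_zero.2 hx; omega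
    rw [next_pow2_loop_eq |x| hn ((|x| - 1).toNat) 1 0 (le_refl 1) (by omega)]
    have ht : (|x|).toNat = x.natAbs := by rw [habs]; omega
    simp [ht]
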